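-- pv_equiv track=rewrite | github.com/johnwroge/advent_of_code | 2024/Day_14/Solution.py | find_tree_pattern
-- ===== SOURCE A (Python) =====
-- def find_tree_pattern(points):
--     min_r = min(r for r, _ in points)
--     max_r = max(r for r, _ in points)
--     min_c = min(c for _, c in points)
--     max_c = max(c for _, c in points)
--
--     height = max_r - min_r + 1
--     width = max_c - min_c + 1
--
--     positions = set((r, c) for r, c in points)
--
--     if len(positions) != len(points):
--         return False
--
--     consecutive_count = 0
--     for r in range(min_r, max_r + 1):
--         for c in range(min_c, max_c):
--             if (r, c) in positions and (r, c+1) in positions: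
--                 consecutive_count += 1
--                 if consecutive_count >= 5:
--                     return True
--         consecutive_count = 0
--
--     return False
-- ===== SOURCE B (Python) =====
-- def find_tree_pattern(points):
--     pos = set(points)
--     if len(pos) != len(points):
--         return False
--     rows = {}
--     for r, c in points:
--         if (r, c + 1) in pos:
--             n = rows.get(r, 0) + 1
--             if n >= 5:
--                 return True
--             rows[r] = n
--     return False
-- ===== Notes on version B (the rewrite author's own statement) =====
-- stated objective: faster
-- what changed: Instead of scanning every cell of the bounding grid row by row, B makes one pass over the points themselves, counting per-row right-neighbour pairs via set lookups in a dict of per-row counters.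
import Mathlib
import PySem

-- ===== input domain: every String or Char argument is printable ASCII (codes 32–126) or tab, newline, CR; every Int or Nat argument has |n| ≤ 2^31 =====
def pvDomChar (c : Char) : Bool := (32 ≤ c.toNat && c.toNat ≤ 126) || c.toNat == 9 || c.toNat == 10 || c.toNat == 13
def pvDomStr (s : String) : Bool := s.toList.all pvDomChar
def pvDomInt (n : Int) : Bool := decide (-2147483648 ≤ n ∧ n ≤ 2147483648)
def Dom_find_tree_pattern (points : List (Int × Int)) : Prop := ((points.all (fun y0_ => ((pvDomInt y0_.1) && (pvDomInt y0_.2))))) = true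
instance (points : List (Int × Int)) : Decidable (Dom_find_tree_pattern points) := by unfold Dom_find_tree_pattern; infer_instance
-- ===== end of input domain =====

-- B replaces A's scan over every cell of the bounding grid by one pass over the points
-- with per-row counters of right-neighbour pairs (objective: faster; O(n) passes over the points instead of A's O(width*height) grid scan).

-- ===== PORT A =====
-- inner 'for c in range(min_c, max_c)' loop with running consecutive_count and early return
def find_tree_pattern_inner (positions : PySem.Set (Int × Int)) (r : Int)
    (cs : List Int) (cnt : Int) : Bool :=
  match cs with
  | [] => false
  | c :: rest =>
    if PySem.Set.contains positions (r, c) && PySem.Set.contains positions (r, c + 1) then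
      if cnt + 1 ≥ 5 then true
      else find_tree_pattern_inner positions r rest (cnt + 1)
    else find_tree_pattern_inner positions r rest cnt

-- outer 'for r in range(min_r, max_r + 1)' loop; consecutive_count restarts at 0 each row
def find_tree_pattern_outer (positions : PySem.Set (Int × Int))
    (rs : List Int) (min_c max_c : Int) : Bool :=
  match rs with
  | [] => false
  | r :: rest =>
    if find_tree_pattern_inner positions r (PySem.List.pyRange min_c max_c 1) 0 then true
    else find_tree_pattern_outer positions rest min_c max_c

def find_tree_pattern (points : List (Int × Int)) : Bool :=
  match PySem.List.min? (points.map (fun p => p.1)) (fun x => x),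
        PySem.List.max? (points.map (fun p => p.1)) (fun x => x),
        PySem.List.min? (points.map (fun p => p.2)) (fun x => x),
        PySem.List.max? (points.map (fun p => p.2)) (fun x => x) with
  | some min_r, some max_r, some min_c, some max_c =>
    let positions := PySem.Set.ofList (points.map (fun p => (p.1, p.2)))
    if PySem.Set.len positions ≠ (points.length : Int) then false
    else find_tree_pattern_outer positions (PySem.List.pyRange min_r (max_r + 1) 1) min_c max_c
  | _, _, _, _ => false   -- min()/max() of an empty generator raise ValueError (outside Pre_)

-- ===== PORT B =====
-- one pass over the points, counting right-neighbour pairs per row in a dict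
def find_tree_pattern_alt_loop (pos : PySem.Set (Int × Int))
    (pts : List (Int × Int)) (rows : PySem.Dict Int Int) : Bool :=
  match pts with
  | [] => false
  | (r, c) :: rest =>
    if PySem.Set.contains pos (r, c + 1) then
      let n := PySem.Dict.getD rows r 0 + 1
      if n ≥ 5 then true
      else find_tree_pattern_alt_loop pos rest (PySem.Dict.insert rows r n)
    else find_tree_pattern_alt_loop pos rest rows

def find_tree_pattern_alt (points : List (Int × Int)) : Bool :=
  let pos := PySem.Set.ofList points
  if PySem.Set.len pos ≠ (points.length : Int) then false
  else find_tree_pattern_alt_loop pos points PySem.Dict.empty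

-- ===== PRECONDITION & SPEC =====
-- Pre_ excludes only the empty list, on which A's min() raises ValueError.
def Pre_find_tree_pattern (points : List (Int × Int)) : Prop := points ≠ []
instance (points : List (Int × Int)) : Decidable (Pre_find_tree_pattern points) := by
  unfold Pre_find_tree_pattern; infer_instance

def pvWitness_find_tree_pattern : (List (Int × Int)) := [(1, 2), (1, 3)]

def Spec_find_tree_pattern (points : List (Int × Int)) (out : Bool) : Prop :=
  out = find_tree_pattern_alt points
instance (points : List (Int × Int)) (out : Bool) : Decidable (Spec_find_tree_pattern points out) := by
  unfold Spec_find_tree_pattern; infer_instance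

-- ===== CLAIM (what is proved, stated in full; the proofs are below) =====
def Claim_equal_find_tree_pattern : Prop := ∀ (points : List (Int × Int)), Dom_find_tree_pattern points → Pre_find_tree_pattern points → Spec_find_tree_pattern points (find_tree_pattern points)

-- ===== LEMMAS AND PROOFS =====

-- number of cells c in cs with both (r,c) and (r,c+1) present (A's per-row pair count)
def pvGridCnt (pos : PySem.Set (Int × Int)) (r : Int) (cs : List Int) : Nat :=
  (cs.filter (fun c => PySem.Set.contains pos (r, c) && PySem.Set.contains pos (r, c + 1))).length

-- number of points of row r whose right neighbour is present (B's per-row count)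
def pvPtCnt (pos : PySem.Set (Int × Int)) (pts : List (Int × Int)) (r : Int) : Nat :=
  (pts.filter (fun p => p.1 == r && PySem.Set.contains pos (p.1, p.2 + 1))).length

lemma pvInner_iff (pos : PySem.Set (Int × Int)) (r : Int) (cs : List Int) (cnt : Int)
    (h : cnt < 5) :
    find_tree_pattern_inner pos r cs cnt = true ↔ 5 ≤ cnt + (pvGridCnt pos r cs : Int) := by
  induction cs generalizing cnt with
  | nil => simp [find_tree_pattern_inner, pvGridCnt]; omega
  | cons c rest ih =>
    simp only [find_tree_pattern_inner, pvGridCnt, List.filter_cons]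
    by_cases hq : (PySem.Set.contains pos (r, c) && PySem.Set.contains pos (r, c + 1)) = true
    · simp only [hq, if_true, List.length_cons]
      by_cases h5 : cnt + 1 ≥ 5
      · simp only [h5, if_true]
        constructor
        · intro _; push_cast; omega
        · intro _; trivial
      · simp only [h5, if_false]
        rw [ih (cnt + 1) (by omega)]
        simp only [pvGridCnt]; push_cast; omega
    · simp only [hq, Bool.false_eq_true, if_false]
      exact (ih cnt h).trans (by simp only [pvGridCnt])

lemma pvOuter_iff (pos : PySem.Set (Int × Int)) (rs : List Int) (min_c max_c : Int) :
    find_tree_pattern_outer pos rs min_c max_c = true ↔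
      ∃ r ∈ rs, 5 ≤ (pvGridCnt pos r (PySem.List.pyRange min_c max_c 1) : Int) := by
  induction rs with
  | nil => simp [find_tree_pattern_outer]
  | cons r rest ih =>
    simp only [find_tree_pattern_outer]
    by_cases hr : find_tree_pattern_inner pos r (PySem.List.pyRange min_c max_c 1) 0 = true
    · simp only [hr, if_true, true_iff]
      exact ⟨r, List.mem_cons_self, by have := (pvInner_iff pos r _ 0 (by omega)).1 hr; omega⟩
    · simp only [hr, Bool.false_eq_true, if_false]
      rw [ih]
      constructor
      · rintro ⟨x, hx, h5⟩; exact ⟨x, List.mem_cons_of_mem _ hx, h5⟩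
      · rintro ⟨x, hx, h5⟩
        rcases List.mem_cons.1 hx with rfl | hx'
        · exact absurd ((pvInner_iff pos x _ 0 (by omega)).2 (by omega)) hr
        · exact ⟨x, hx', h5⟩

lemma pvBLoop_iff (pos : PySem.Set (Int × Int)) (pts : List (Int × Int))
    (rows : PySem.Dict Int Int) (h : ∀ r, PySem.Dict.getD rows r 0 < 5) :
    find_tree_pattern_alt_loop pos pts rows = true ↔
      ∃ r, 5 ≤ PySem.Dict.getD rows r 0 + (pvPtCnt pos pts r : Int) := by
  induction pts generalizing rows with
  | nil =>
    simp only [find_tree_pattern_alt_loop, pvPtCnt, List.filter_nil, List.length_nil,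
      Nat.cast_zero, add_zero, Bool.false_eq_true, false_iff]
    rintro ⟨r, hr⟩
    exact absurd hr (not_le.2 (lt_of_lt_of_le (h r) (by omega)))
  | cons p rest ih =>
    obtain ⟨r, c⟩ := p
    simp only [find_tree_pattern_alt_loop]
    by_cases hq : PySem.Set.contains pos (r, c + 1) = true
    · simp only [hq, if_true]
      by_cases h5 : PySem.Dict.getD rows r 0 + 1 ≥ 5
      · simp only [h5, if_true, true_iff]
        refine ⟨r, ?_⟩
        have hm : (r, c + 1) ∈ pos := by simpa using hq
        have : pvPtCnt pos ((r, c) :: rest) r = pvPtCnt pos rest r + 1 := by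
          simp [pvPtCnt, hm]
        rw [this]; push_cast; omega
      · simp only [h5, if_false]
        rw [ih _ (by
          intro r'
          rw [PySem.Dict.getD_insert]
          split_ifs with he
          · omega
          · exact h r')]
        apply exists_congr
        intro r'
        rw [PySem.Dict.getD_insert]
        by_cases he : r' = r
        · subst he
          have hm : (r', c + 1) ∈ pos := by simpa using hq
          have : pvPtCnt pos ((r', c) :: rest) r' = pvPtCnt pos rest r' + 1 := by
            simp [pvPtCnt, hm]
          rw [this]; simp only [if_true]; push_cast; omega
        · have : pvPtCnt pos ((r, c) :: rest) r' = pvPtCnt pos rest r' := by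
            simp only [pvPtCnt, List.filter_cons]
            have : (r == r') = false := by simp [Ne.symm he]
            simp [this]
          rw [this, if_neg he]
    · simp only [hq, Bool.false_eq_true, if_false]
      rw [ih _ h]
      apply exists_congr
      intro r'
      have : pvPtCnt pos ((r, c) :: rest) r' = pvPtCnt pos rest r' := by
        simp only [pvPtCnt, List.filter_cons]
        have hm : (r, c + 1) ∉ pos := by simpa using hq
        simp [hm]
      rw [this]

lemma pvFoldlAdd_sublist (xs : List (Int × Int)) : ∀ s : PySem.Set (Int × Int),
    (xs.foldl PySem.Set.add s).Sublist (s ++ xs) := by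
  induction xs with
  | nil => intro s; simp
  | cons x rest ih =>
    intro s
    simp only [List.foldl_cons]
    refine (ih (PySem.Set.add s x)).trans ?_
    by_cases hc : PySem.Set.contains s x = true
    · have : PySem.Set.add s x = s := by
        simp only [PySem.Set.add]
        rw [if_pos (by simpa using hc)]
      rw [this]
      exact List.Sublist.append_left (List.sublist_cons_self _ _) s
    · have : PySem.Set.add s x = s ++ [x] := by
        simp only [PySem.Set.add]
        rw [if_neg (by simpa using hc)]
      rw [this, List.append_assoc]
      exact List.Sublist.refl _

lemma pvOfList_sublist (xs : List (Int × Int)) : (PySem.Set.ofList xs).Sublist xs := by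
  rw [PySem.Set.ofList_eq_foldl]
  simpa using pvFoldlAdd_sublist xs []

lemma pvCnt_eq (pts : List (Int × Int)) (hnd : pts.Nodup) (min_c max_c : Int)
    (hlo : ∀ p ∈ pts, min_c ≤ p.2) (hhi : ∀ p ∈ pts, p.2 ≤ max_c) (r : Int) :
    pvGridCnt pts r (PySem.List.pyRange min_c max_c 1) = pvPtCnt pts pts r := by
  classical
  unfold pvGridCnt pvPtCnt
  rw [show (pts.filter (fun p => p.1 == r && PySem.Set.contains pts (p.1, p.2 + 1))).length
      = ((pts.filter (fun p => p.1 == r && PySem.Set.contains pts (p.1, p.2 + 1))).map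
          (fun p : Int × Int => p.2)).length from (List.length_map ..).symm]
  apply List.Perm.length_eq
  have h1 : ((PySem.List.pyRange min_c max_c 1).filter
      (fun c => PySem.Set.contains pts (r, c) && PySem.Set.contains pts (r, c + 1))).Nodup :=
    (PySem.List.nodup_pyRange_one min_c max_c).filter _
  have h2 : ((pts.filter (fun p => p.1 == r && PySem.Set.contains pts (p.1, p.2 + 1))).map
      (fun p : Int × Int => p.2)).Nodup := by
    apply (hnd.filter _).map_on
    intro x hx y hy hxy
    have hx1 : x.1 = r := by
      have := (List.mem_filter.1 hx).2; simp at this; exact this.1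
    have hy1 : y.1 = r := by
      have := (List.mem_filter.1 hy).2; simp at this; exact this.1
    exact Prod.ext (hx1.trans hy1.symm) hxy
  rw [List.perm_ext_iff_of_nodup h1 h2]
  intro c
  simp only [List.mem_filter, PySem.List.mem_pyRange_one, List.mem_map]
  constructor
  · rintro ⟨⟨hlc, hcu⟩, hb⟩
    simp only [Bool.and_eq_true, PySem.Set.contains_eq_listContains,
      List.contains_iff_mem] at hb
    exact ⟨(r, c), ⟨hb.1, by simp [hb.2]⟩, rfl⟩
  · rintro ⟨p, ⟨hpm, hpb⟩, rfl⟩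
    simp only [Bool.and_eq_true, beq_iff_eq, PySem.Set.contains_eq_listContains,
      List.contains_iff_mem] at hpb
    obtain ⟨hp1, hp2⟩ := hpb
    have hmem : (r, p.2) ∈ pts := by rw [← hp1]; exact hpm
    have hmem2 : (r, p.2 + 1) ∈ pts := by rw [← hp1]; exact hp2
    refine ⟨⟨hlo (r, p.2) hmem, ?_⟩, by simp [hmem, hmem2]⟩
    have := hhi (r, p.2 + 1) hmem2
    simp at this
    omega

-- ===== VERDICT (by name: the statement is the Claim_ definition above) =====
theorem find_tree_pattern_spec : Claim_equal_find_tree_pattern := by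
  intro points _ hne
  unfold Spec_find_tree_pattern
  have hmapr : points.map (fun p : Int × Int => p.1) ≠ [] := by
    simpa using hne
  have hmapc : points.map (fun p : Int × Int => p.2) ≠ [] := by
    simpa using hne
  obtain ⟨min_r, hminr⟩ : ∃ m, PySem.List.min? (points.map (fun p : Int × Int => p.1)) (fun x => x) = some m := by
    cases h : PySem.List.min? (points.map (fun p : Int × Int => p.1)) (fun x => x) with
    | none => exact absurd ((PySem.List.min?_eq_none_iff _ _).1 h) hmapr
    | some m => exact ⟨m, rfl⟩
  obtain ⟨max_r, hmaxr⟩ : ∃ m, PySem.List.max? (points.map (fun p : Int × Int => p.1)) (fun x => x) = some m := by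
    cases h : PySem.List.max? (points.map (fun p : Int × Int => p.1)) (fun x => x) with
    | none => exact absurd ((PySem.List.max?_eq_none_iff _ _).1 h) hmapr
    | some m => exact ⟨m, rfl⟩
  obtain ⟨min_c, hminc⟩ : ∃ m, PySem.List.min? (points.map (fun p : Int × Int => p.2)) (fun x => x) = some m := by
    cases h : PySem.List.min? (points.map (fun p : Int × Int => p.2)) (fun x => x) with
    | none => exact absurd ((PySem.List.min?_eq_none_iff _ _).1 h) hmapc
    | some m => exact ⟨m, rfl⟩
  obtain ⟨max_c, hmaxc⟩ : ∃ m, PySem.List.max? (points.map (fun p : Int × Int => p.2)) (fun x => x) = some m := by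
    cases h : PySem.List.max? (points.map (fun p : Int × Int => p.2)) (fun x => x) with
    | none => exact absurd ((PySem.List.max?_eq_none_iff _ _).1 h) hmapc
    | some m => exact ⟨m, rfl⟩
  have hmapid : points.map (fun p : Int × Int => (p.1, p.2)) = points := by simp
  unfold find_tree_pattern find_tree_pattern_alt
  rw [hminr, hmaxr, hminc, hmaxc, hmapid]
  by_cases hdup : (PySem.Set.ofList points).length = points.length
  case neg => simp [hdup]
  case pos =>
    have heq : PySem.Set.ofList points = points :=
      (pvOfList_sublist points).eq_of_length hdup
    have hnd : points.Nodup := heq ▸ PySem.Set.nodup_ofList points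
    simp only [heq]
    have hlo : ∀ p ∈ points, min_c ≤ p.2 := by
      intro p hp
      exact PySem.List.min?_isMin hminc p.2 (List.mem_map_of_mem hp)
    have hhi : ∀ p ∈ points, p.2 ≤ max_c := by
      intro p hp
      exact PySem.List.max?_isMax hmaxc p.2 (List.mem_map_of_mem hp)
    have h0 : ∀ r : Int, PySem.Dict.getD (PySem.Dict.empty : PySem.Dict Int Int) r 0 < 5 := by
      intro r; simp [PySem.Dict.getD_empty]
    apply Bool.eq_iff_iff.2
    have hcond : PySem.Set.len points = (points.length : Int) := by simp [PySem.Set.len]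
    rw [if_neg (not_not_intro hcond), if_neg (not_not_intro hcond)]
    rw [pvOuter_iff, pvBLoop_iff points points PySem.Dict.empty h0]
    constructor
    · rintro ⟨r, _, hr5⟩
      refine ⟨r, ?_⟩
      rw [pvCnt_eq points hnd min_c max_c hlo hhi r] at hr5
      rw [PySem.Dict.getD_empty]
      omega
    · rintro ⟨r, hr5⟩
      rw [PySem.Dict.getD_empty] at hr5
      have hpt : 0 < pvPtCnt points points r := by
        rcases Nat.eq_zero_or_pos (pvPtCnt points points r) with hz | hpos
        · rw [hz] at hr5; simp at hr5
        · exact hpos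
      have hnn : (points.filter (fun p => p.1 == r && PySem.Set.contains points (p.1, p.2 + 1))) ≠ [] := by
        intro hcon
        unfold pvPtCnt at hpt
        rw [hcon] at hpt
        simp at hpt
      obtain ⟨p, hpmem⟩ := List.exists_mem_of_ne_nil _ hnn
      obtain ⟨hpin, hpb⟩ := List.mem_filter.1 hpmem
      have hp1 : p.1 = r := by
        simp only [Bool.and_eq_true, beq_iff_eq] at hpb
        exact hpb.1
      have hrlo : min_r ≤ r := by
        have := PySem.List.min?_isMin hminr p.1 (List.mem_map_of_mem hpin)
        omega
      have hrhi : r ≤ max_r := by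
        have := PySem.List.max?_isMax hmaxr p.1 (List.mem_map_of_mem hpin)
        omega
      refine ⟨r, PySem.List.mem_pyRange_one.2 ⟨hrlo, by omega⟩, ?_⟩
      rw [pvCnt_eq points hnd min_c max_c hlo hhi r]
      omega
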